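-- pv_equiv track=rewrite | github.com/Orenjonas/natural_language_processing_with_disaster_tweets | EDA_and_cleaning.py | get_unused_words
-- ===== SOURCE A (Python) =====
-- def get_unused_words(word_dict: dict , word_list: list):
--     """Returns a list of words from word_dict not contained in word_list"""
--     unused_words = word_dict.copy()#.keys())
--
--     # Remove words in tweet data from the dict
--     for word in word_list:
--         try:
--             unused_words.pop(word)
--         except KeyError:
--             pass
--
--     #Convert dict to list
--     return list(unused_words.keys())
-- ===== SOURCE B (Python) =====
-- def get_unused_words(word_dict: dict, word_list: list):
--     """Returns a list of words from word_dict not contained in word_list"""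
--     seen = dict.fromkeys(word_list)
--     unused_words = []
--     for word in word_dict:
--         if word not in seen:
--             unused_words.append(word)
--     return unused_words
-- ===== Notes on version B (the rewrite author's own statement) =====
-- stated objective: idiomatic
-- what changed: Instead of copying the dict and popping each word of word_list inside a try/except, B builds a lookup table from word_list once (dict.fromkeys) and accumulates the dict's keys that are absent from it in a single forward loop; no dict copy, no mutation, no exception handling.
import Mathlib
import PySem

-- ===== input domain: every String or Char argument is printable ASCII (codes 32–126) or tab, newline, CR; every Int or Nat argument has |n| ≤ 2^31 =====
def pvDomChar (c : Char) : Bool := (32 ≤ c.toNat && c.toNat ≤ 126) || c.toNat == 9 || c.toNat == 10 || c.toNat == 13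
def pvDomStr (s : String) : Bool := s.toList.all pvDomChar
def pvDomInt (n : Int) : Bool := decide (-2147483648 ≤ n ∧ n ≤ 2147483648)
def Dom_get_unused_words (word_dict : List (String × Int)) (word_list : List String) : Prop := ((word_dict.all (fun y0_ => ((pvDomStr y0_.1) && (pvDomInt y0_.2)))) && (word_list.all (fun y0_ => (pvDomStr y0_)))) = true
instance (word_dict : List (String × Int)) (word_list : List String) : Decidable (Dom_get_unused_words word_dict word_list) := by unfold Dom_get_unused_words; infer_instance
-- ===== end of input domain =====

-- B replaces A's dict copy + per-word pop/try-except with one lookup table built from word_list (dict.fromkeys) and a single accumulator loop over the dict's keys; same return value, no dict copy or mutation (objective: idiomatic).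


-- ===== PORT A =====
-- Port of A: copy the dict, pop each word of word_list (KeyError ignored = erase is a no-op
-- when the key is absent), then list the remaining keys.
def get_unused_words (word_dict : List (String × Int)) (word_list : List String) : List String :=
  let unused_words := PySem.Dict.ofList word_dict
  let unused_words := word_list.foldl (fun d word => d.erase word) unused_words
  unused_words.keys

-- ===== PORT B =====
-- Port of B: seen = dict.fromkeys(word_list); then one forward loop over the dict's keys
-- (= ordered dedup of the pair list's first components), appending those not in seen.
def get_unused_words_alt (word_dict : List (String × Int)) (word_list : List String) : List String :=
  let seen : PySem.Dict String (Option Int) :=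
    PySem.Dict.ofList (word_list.map (fun w => (w, none)))
  (PySem.List.dedup (word_dict.map Prod.fst)).foldl
    (fun unused word => if seen.contains word then unused else unused ++ [word]) []

-- ===== PRECONDITION & SPEC =====
def Spec_get_unused_words (word_dict : List (String × Int)) (word_list : List String) (out : List String) : Prop := out = get_unused_words_alt word_dict word_list
instance (word_dict : List (String × Int)) (word_list : List String) (out : List String) : Decidable (Spec_get_unused_words word_dict word_list out) := by unfold Spec_get_unused_words; infer_instance

-- ===== CLAIM (what is proved, stated in full; the proofs are below) =====
def Claim_equal_get_unused_words : Prop := ∀ (word_dict : List (String × Int)) (word_list : List String), Dom_get_unused_words word_dict word_list → Spec_get_unused_words word_dict word_list (get_unused_words word_dict word_list)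

-- ===== LEMMAS AND PROOFS =====

-- erasing every word of wl from d filters d's items by wl-membership of the key
theorem foldl_erase_items {κ ν : Type} [BEq κ] (wl : List κ) (d : PySem.Dict κ ν) :
    (wl.foldl (fun d w => d.erase w) d).items
      = d.items.filter (fun p => !(wl.contains p.1)) := by
  induction wl generalizing d with
  | nil => simp
  | cons w wl ih =>
      rw [List.foldl_cons, ih]
      simp only [PySem.Dict.erase, List.filter_filter]
      apply List.filter_congr
      intro p _
      by_cases h : p.1 == w <;> simp [h, List.contains_cons]

-- the keys of dict(pairs) are the ordered dedup of the pairs' first components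
theorem keys_ofList_eq_dedup {ν : Type} (l : List (String × ν)) :
    (PySem.Dict.ofList l).keys = PySem.List.dedup (l.map Prod.fst) := by
  simp only [PySem.List.dedup_eq_ofList, PySem.Dict.ofList, PySem.Dict.update]
  rw [PySem.Dict.keys_foldl_insert_key (key := Prod.fst) (f := fun _ p => p.2)]
  simp [PySem.Set.ofList_eq_foldl, PySem.Set.update, PySem.Dict.keys_empty]

-- membership in dict.fromkeys(wl) is list membership in wl
theorem contains_fromkeys (wl : List String) (k : String) :
    (PySem.Dict.ofList (wl.map (fun w => (w, (none : Option Int))))).contains k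
      = wl.contains k := by
  rw [Bool.eq_iff_iff, PySem.Dict.contains_iff_mem_keys, keys_ofList_eq_dedup]
  simp

theorem get_unused_words_spec : Claim_equal_get_unused_words := by
  intro word_dict word_list _
  unfold Spec_get_unused_words
  unfold get_unused_words get_unused_words_alt
  simp only [foldl_erase_items, PySem.Dict.keys]
  rw [show (fun (unused : List String) (word : String) =>
        if (PySem.Dict.ofList (word_list.map (fun w => (w, (none : Option Int))))).contains word
        then unused else unused ++ [word])
      = (fun unused word => if !(word_list.contains word) then unused ++ [word] else unused) by
        funext u w; rw [contains_fromkeys]; by_cases h : word_list.contains w <;> simp]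
  rw [PySem.List.foldl_append_if_eq_filter]
  rw [← keys_ofList_eq_dedup word_dict, PySem.Dict.keys, List.filter_map]
  rfl

-- ===== VERDICT (by name: the statement is the Claim_ definition above) =====
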